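-- pv_equiv track=rewrite | github.com/mdgdeveloper/Gridlock-Arena-of-Mythos | lumoria/app.py | calculate_light_intensity
-- ===== SOURCE A (Python) =====
-- def calculate_light_intensity(planet, planets):
--     """
--     Calculates the light intensity on a given planet based on the presence of shadow planets.
--
--     Parameters:
--     planet (dict): A dictionary representing the planet for which light intensity needs to be calculated.
--     planets (list): A list of dictionaries representing all the planets in the system.
--
--     Returns:
--     str: The light intensity on the planet. Possible values are "None (Multiple Shadows)", "None", "Partial", or "Full".
--     """
--     shadow_planets = [p for p in planets if p["Distance (AU)"] < planet["Distance (AU)"] and p["Size (km)"] > planet["Size (km)"]]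
--     if len(shadow_planets) > 1:
--         return "None (Multiple Shadows)"
--     elif len(shadow_planets) == 1:
--         return "None"
--     elif any(p["Size (km)"] < planet["Size (km)"] for p in planets if p["Distance (AU)"] < planet["Distance (AU)"]):
--         return "Partial"
--     else:
--         return "Full"
-- ===== SOURCE B (Python) =====
-- def calculate_light_intensity(planet, planets):
--     """Sort the sizes of closer planets descending and classify from the extremes
--     (second-largest, largest, smallest) instead of counting matches."""
--     sizes = sorted((p["Size (km)"] for p in planets
--                     if p["Distance (AU)"] < planet["Distance (AU)"]), reverse=True)
--     if not sizes:
--         return "Full"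
--     size = planet["Size (km)"]
--     if len(sizes) >= 2 and sizes[1] > size:
--         return "None (Multiple Shadows)"
--     if sizes[0] > size:
--         return "None"
--     if sizes[-1] < size:
--         return "Partial"
--     return "Full"
-- ===== Notes on version B (the rewrite author's own statement) =====
-- stated objective: alternative
-- what changed: A counts shadow planets with a comprehension and then rescans with any(); B instead collects the sizes of the closer planets, sorts them descending, and classifies from the extremes: second-largest > size means multiple shadows, largest > size means one shadow, smallest < size means partial.
import Mathlib
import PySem

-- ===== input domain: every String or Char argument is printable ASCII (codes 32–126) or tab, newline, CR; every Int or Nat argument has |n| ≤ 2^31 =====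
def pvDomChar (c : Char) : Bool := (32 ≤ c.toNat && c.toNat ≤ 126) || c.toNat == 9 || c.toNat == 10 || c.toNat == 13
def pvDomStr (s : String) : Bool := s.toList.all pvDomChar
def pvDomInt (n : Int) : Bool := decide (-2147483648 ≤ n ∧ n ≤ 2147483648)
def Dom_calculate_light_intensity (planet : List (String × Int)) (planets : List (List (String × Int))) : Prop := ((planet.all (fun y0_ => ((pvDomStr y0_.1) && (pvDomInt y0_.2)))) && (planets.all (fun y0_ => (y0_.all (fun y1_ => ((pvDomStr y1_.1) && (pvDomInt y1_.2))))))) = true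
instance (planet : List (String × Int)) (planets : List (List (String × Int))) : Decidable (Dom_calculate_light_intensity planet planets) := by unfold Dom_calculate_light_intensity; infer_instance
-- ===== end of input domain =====

-- B replaces A's count-and-rescan with a sort: it sorts the sizes of the closer planets
-- descending and classifies from the extremes (second-largest, largest, smallest); objective: alternative.

-- shared helper: d[k] for a dict given as an association list (Pre_ guarantees the key is present)
def pvLook (d : List (String × Int)) (k : String) : Int :=
  PySem.Dict.getD (PySem.Dict.mk d) k 0

-- ===== PORT A =====
def calculate_light_intensity (planet : List (String × Int)) (planets : List (List (String × Int))) : String :=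
  let pd := pvLook planet "Distance (AU)"
  let psz := pvLook planet "Size (km)"
  let shadow_planets := planets.filter
    (fun p => decide (pvLook p "Distance (AU)" < pd) && decide (psz < pvLook p "Size (km)"))
  if shadow_planets.length > 1 then "None (Multiple Shadows)"
  else if shadow_planets.length = 1 then "None"
  else if planets.any
      (fun p => decide (pvLook p "Distance (AU)" < pd) && decide (pvLook p "Size (km)" < psz)) then
    "Partial"
  else "Full"

-- ===== PORT B =====
def calculate_light_intensity_alt (planet : List (String × Int)) (planets : List (List (String × Int))) : String :=
  let sizes := PySem.List.sorted
    ((planets.filter (fun p => decide (pvLook p "Distance (AU)" < pvLook planet "Distance (AU)"))).map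
      (fun p => pvLook p "Size (km)")) (fun x => x) true
  if sizes = [] then "Full"
  else
    let size := pvLook planet "Size (km)"
    if 2 ≤ sizes.length ∧ size < PySem.List.pyGetD sizes 1 0 then "None (Multiple Shadows)"
    else if size < PySem.List.pyGetD sizes 0 0 then "None"
    else if PySem.List.pyGetD sizes (-1) 0 < size then "Partial"
    else "Full"

-- ===== PRECONDITION & SPEC =====
-- Pre_ excludes exactly the inputs where Python A (and B) raises KeyError: a key is actually
-- looked up (short-circuit "and" skips the rest once a comparison fails) but missing from its dict.
def Pre_calculate_light_intensity (planet : List (String × Int)) (planets : List (List (String × Int))) : Prop :=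
  (planets ≠ [] → "Distance (AU)" ∈ planet.map Prod.fst) ∧
  ∀ p ∈ planets, "Distance (AU)" ∈ p.map Prod.fst ∧
    (pvLook p "Distance (AU)" < pvLook planet "Distance (AU)" →
      "Size (km)" ∈ p.map Prod.fst ∧ "Size (km)" ∈ planet.map Prod.fst)
instance (planet : List (String × Int)) (planets : List (List (String × Int))) : Decidable (Pre_calculate_light_intensity planet planets) := by unfold Pre_calculate_light_intensity; infer_instance

def pvWitness_calculate_light_intensity : (List (String × Int)) × (List (List (String × Int))) :=
  ([("Distance (AU)", 1), ("Size (km)", 5)], [[("Distance (AU)", 0), ("Size (km)", 9)]])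

def Spec_calculate_light_intensity (planet : List (String × Int)) (planets : List (List (String × Int))) (out : String) : Prop := out = calculate_light_intensity_alt planet planets
instance (planet : List (String × Int)) (planets : List (List (String × Int))) (out : String) : Decidable (Spec_calculate_light_intensity planet planets out) := by unfold Spec_calculate_light_intensity; infer_instance

-- ===== CLAIM (what is proved, stated in full; the proofs are below) =====
def Claim_equal_calculate_light_intensity : Prop := ∀ (planet : List (String × Int)) (planets : List (List (String × Int))), Dom_calculate_light_intensity planet planets → Pre_calculate_light_intensity planet planets → Spec_calculate_light_intensity planet planets (calculate_light_intensity planet planets)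

-- ===== LEMMAS AND PROOFS =====

-- in a descending list the last element is the minimum
lemma pvGetLast_le_of_pairwise (cs : List Int) (h : cs ≠ []) (hpw : cs.Pairwise (fun a b => b ≤ a)) :
    ∀ x ∈ cs, cs.getLast h ≤ x :=
  match cs, h, hpw with
  | [a], _, _ => by intro x hx; simp at hx; simp [hx]
  | a :: b :: t, _, hpw => by
      intro x hx
      have ih := pvGetLast_le_of_pairwise (b :: t) (by simp) (List.pairwise_cons.mp hpw).2
      rw [List.getLast_cons (by simp)]
      rcases List.mem_cons.mp hx with rfl | hx'
      · exact (List.pairwise_cons.mp hpw).1 _ (List.getLast_mem _)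
      · exact ih _ hx'

-- the decision chain on the counted/scanned form equals the chain on the sorted-descending form
lemma pvChainEq (sz : Int) (cs : List Int) (hpw : cs.Pairwise (fun a b => b ≤ a)) :
    (if 1 < cs.countP (fun x => decide (sz < x)) then "None (Multiple Shadows)"
     else if cs.countP (fun x => decide (sz < x)) = 1 then "None"
     else if cs.any (fun x => decide (x < sz)) then "Partial" else "Full")
    =
    (if cs = [] then "Full"
     else if 2 ≤ cs.length ∧ sz < PySem.List.pyGetD cs 1 0 then "None (Multiple Shadows)"
     else if sz < PySem.List.pyGetD cs 0 0 then "None"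
     else if PySem.List.pyGetD cs (-1) 0 < sz then "Partial" else "Full") := by
  match cs, hpw with
  | [], _ => simp
  | [a], _ =>
      have hget0 : PySem.List.pyGetD [a] 0 0 = a := by simp [pysem]
      have hgetm1 : PySem.List.pyGetD [a] (-1) 0 = a := by simp [pysem]
      by_cases h1 : sz < a
      · simp [h1, hget0]
      · by_cases h3 : a < sz <;> simp [h1, h3, hget0, hgetm1]
  | a :: b :: t, hpw =>
      have hba : b ≤ a := (List.pairwise_cons.mp hpw).1 b (by simp)
      have hpw' : (b :: t).Pairwise (fun x y => y ≤ x) := (List.pairwise_cons.mp hpw).2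
      have hget1 : PySem.List.pyGetD (a :: b :: t) 1 0 = b := by simp [pysem]
      have hget0 : PySem.List.pyGetD (a :: b :: t) 0 0 = a := by simp [pysem]
      -- name the minimum L to keep `getLast` proofs out of the way
      obtain ⟨L, hLmem, hLmin, hgetm1⟩ :
          ∃ L, L ∈ a :: b :: t ∧ (∀ x ∈ a :: b :: t, L ≤ x) ∧
            PySem.List.pyGetD (a :: b :: t) (-1) 0 = L :=
        ⟨(a :: b :: t).getLast (by simp), List.getLast_mem _,
          pvGetLast_le_of_pairwise _ (by simp) hpw, PySem.List.pyGetD_neg_one _ 0 (by simp)⟩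
      by_cases hb : sz < b
      · have hcnt : 1 < (a :: b :: t).countP (fun x => decide (sz < x)) := by
          have haa : sz < a := lt_of_lt_of_le hb hba
          simp [haa, hb]
        simp [hcnt, hget1, hb]
      · have htle : ∀ x ∈ b :: t, x ≤ sz := by
          intro x hx
          rcases List.mem_cons.mp hx with rfl | hx'
          · omega
          · have := (List.pairwise_cons.mp hpw').1 x hx'
            omega
        have hcnt0 : (b :: t).countP (fun x => decide (sz < x)) = 0 := by
          rw [List.countP_eq_zero]
          intro x hx
          simpa using not_lt.mpr (htle x hx)
        by_cases ha : sz < a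
        · have hcnt : (a :: b :: t).countP (fun x => decide (sz < x)) = 1 := by
            simp [ha, hcnt0]
          simp [hcnt, hget1, hget0, hb, ha]
        · have hcnt : (a :: b :: t).countP (fun x => decide (sz < x)) = 0 := by
            simp [ha, hcnt0]
          by_cases hl : L < sz
          · have hanyT : ((a :: b :: t).any (fun x => decide (x < sz))) = true :=
              List.any_eq_true.mpr ⟨L, hLmem, decide_eq_true hl⟩
            simp [hcnt, hget1, hget0, hgetm1, hb, ha, hanyT, hl]
          · have hanyF : ((a :: b :: t).any (fun x => decide (x < sz))) = false := by
              rw [List.any_eq_false]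
              intro x hx
              have := hLmin x hx
              simp
              omega
            simp [hcnt, hget1, hget0, hgetm1, hb, ha, hanyF, hl]

-- ===== VERDICT (by name: the statement is the Claim_ definition above) =====
theorem calculate_light_intensity_spec : Claim_equal_calculate_light_intensity := by
  intro planet planets _ _
  unfold Spec_calculate_light_intensity calculate_light_intensity calculate_light_intensity_alt
  dsimp only
  set pd := pvLook planet "Distance (AU)" with hpd
  set psz := pvLook planet "Size (km)" with hpsz
  set closer := planets.filter (fun p => decide (pvLook p "Distance (AU)" < pd)) with hcloser
  set xs := closer.map (fun p => pvLook p "Size (km)") with hxs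
  set cs := PySem.List.sorted xs (fun x => x) true with hcs
  have hperm : cs.Perm xs := PySem.List.sorted_perm xs (fun x => x) true
  have hpw : cs.Pairwise (fun a b => b ≤ a) := by
    simpa using PySem.List.sorted_pairwise_rev (xs := xs) (key := fun x => x)
  -- A's filtered-list length is the count of oversize entries among the closer sizes
  have hlen : (planets.filter
      (fun p => decide (pvLook p "Distance (AU)" < pd) && decide (psz < pvLook p "Size (km)"))).length
      = cs.countP (fun x => decide (psz < x)) := by
    rw [hperm.countP_eq, hxs, List.countP_map, hcloser, List.countP_filter,
      ← List.countP_eq_length_filter]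
    simp [Bool.and_comm]
  -- A's any-scan is the any-scan over the closer sizes
  have hany : (planets.any
      (fun p => decide (pvLook p "Distance (AU)" < pd) && decide (pvLook p "Size (km)" < psz)))
      = cs.any (fun x => decide (x < psz)) := by
    rw [hperm.any_eq, hxs, List.any_map, hcloser, List.any_filter]
    simp
  have hmain := pvChainEq psz cs hpw
  rw [← hlen, ← hany] at hmain
  simpa [Nat.lt_iff_add_one_le] using hmain
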